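-- pv_equiv track=rewrite | github.com/acmeism/RosettaCodeData | Task/Isograms-and-heterograms/Python/isograms-and-heterograms.py | find_n_isograms
-- ===== SOURCE A (Python) =====
-- from collections import Counter
--
-- def find_n_isograms(wordlist):
--     n_isograms = []
--     for word in wordlist:
--         word_lower = word.lower()
--         freq = Counter(word_lower)
--         frequencies = freq.values()
--         if len(set(frequencies)) == 1 and next(iter(frequencies)) > 1:
--             n = next(iter(frequencies))
--             n_isograms.append((-n, -len(word), word))
--     n_isograms.sort()
--     return [word for _, _, word in n_isograms]
-- ===== SOURCE B (Python) =====
-- def _run_lengths(chars):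
--     runs = []
--     while chars:
--         run = 1
--         while run < len(chars) and chars[run] == chars[0]:
--             run += 1
--         runs.append(run)
--         chars = chars[run:]
--     return runs
--
-- def find_n_isograms(wordlist):
--     keyed = []
--     for word in wordlist:
--         runs = _run_lengths(sorted(word.lower()))
--         if runs and all(r == runs[0] for r in runs) and runs[0] > 1:
--             keyed.append((-runs[0], -len(word), word))
--     keyed.sort()
--     return [word for _, _, word in keyed]
-- ===== Notes on version B (the rewrite author's own statement) =====
-- stated objective: alternative
-- what changed: Per word, B sorts the lowercased letters and scans equal-letter run lengths instead of building a Counter hash map and testing the set of its values; the (-n,-len,word) keying and final sort are unchanged.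
import Mathlib
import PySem

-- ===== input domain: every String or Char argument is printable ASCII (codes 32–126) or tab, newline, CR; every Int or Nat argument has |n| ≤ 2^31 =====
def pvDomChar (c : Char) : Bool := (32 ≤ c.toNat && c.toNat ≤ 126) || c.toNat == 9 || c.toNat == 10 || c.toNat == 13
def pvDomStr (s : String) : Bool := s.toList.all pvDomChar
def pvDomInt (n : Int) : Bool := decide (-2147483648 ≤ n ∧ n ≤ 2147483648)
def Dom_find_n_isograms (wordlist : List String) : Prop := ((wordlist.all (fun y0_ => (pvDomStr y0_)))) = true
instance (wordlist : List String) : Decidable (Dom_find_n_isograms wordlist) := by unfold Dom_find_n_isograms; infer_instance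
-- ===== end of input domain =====

-- B replaces Counter-based frequency counting by sorting each word's letters and scanning run lengths (alternative algorithm, same output).


-- shared sort helper: both Pythons call list.sort() on (Int, Int, str) triples; Python's tuple '<' is
-- lexicographic, and .sort() is PySem.List.sorted = this insertBy fold (PySem.List.sorted_eq_foldl_insertBy)
def pyTripleLt (a b : Int × Int × String) : Bool :=
  decide (a.1 < b.1 ∨ (a.1 = b.1 ∧ (a.2.1 < b.2.1 ∨ (a.2.1 = b.2.1 ∧ a.2.2 < b.2.2))))

def pySortTriples (xs : List (Int × Int × String)) : List (Int × Int × String) :=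
  xs.foldl (fun acc x => PySem.List.insertBy pyTripleLt x acc) []

-- ===== PORT A =====
def find_n_isograms (wordlist : List String) : List String :=
  let n_isograms := wordlist.foldl (fun acc word =>
    let word_lower := PySem.Str.lower word
    let frequencies := (PySem.Dict.counter word_lower.toList).values
    -- next(iter(frequencies)) ported as headD 0: exact, since the guard len(set(..)) == 1 forces nonemptiness
    if (PySem.Set.ofList frequencies).length = 1 ∧ frequencies.headD 0 > 1 then
      acc ++ [(-(frequencies.headD 0), -(PySem.Str.len word), word)]
    else acc) []
  (pySortTriples n_isograms).map (fun t => t.2.2)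

-- ===== PORT B =====
-- _run_lengths: leading run (1 + takeWhile) then recurse on the rest (chars = chars[run:])
def runLengths : List Char → List Int
  | [] => []
  | c :: cs =>
    ((1 : Int) + ((cs.takeWhile (fun x => x == c)).length : Int)) ::
      runLengths (cs.dropWhile (fun x => x == c))
termination_by s => s.length
decreasing_by
  simp only [List.length_cons]
  have := List.length_dropWhile_le (fun x => x == c) cs
  omega

def find_n_isograms_alt (wordlist : List String) : List String :=
  let keyed := wordlist.foldl (fun acc word =>
    let runs := runLengths (PySem.List.sorted (PySem.Str.lower word).toList (fun x => x) false)
    if runs ≠ [] ∧ (∀ r ∈ runs, r = runs.headD 0) ∧ runs.headD 0 > 1 then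
      acc ++ [(-(runs.headD 0), -(PySem.Str.len word), word)]
    else acc) []
  (pySortTriples keyed).map (fun t => t.2.2)

-- ===== PRECONDITION & SPEC =====
def Spec_find_n_isograms (wordlist : List String) (out : List String) : Prop := out = find_n_isograms_alt wordlist
instance (wordlist : List String) (out : List String) : Decidable (Spec_find_n_isograms wordlist out) := by unfold Spec_find_n_isograms; infer_instance

-- ===== CLAIM (what is proved, stated in full; the proofs are below) =====
def Claim_equal_find_n_isograms : Prop := ∀ (wordlist : List String), Dom_find_n_isograms wordlist → Spec_find_n_isograms wordlist (find_n_isograms wordlist)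

-- ===== LEMMAS AND PROOFS =====

lemma pv_foldl_add_headD {α : Type} [BEq α] (d : α) :
    ∀ (xs l : List α), l ≠ [] →
      (List.foldl PySem.Set.add l xs).headD d = l.headD d ∧ List.foldl PySem.Set.add l xs ≠ [] := by
  intro xs
  induction xs with
  | nil => intro l hl; exact ⟨rfl, hl⟩
  | cons x xs ih =>
    intro l hl
    have hadd : (PySem.Set.add l x).headD d = l.headD d ∧ PySem.Set.add l x ≠ [] := by
      obtain ⟨a, t, rfl⟩ := List.exists_cons_of_ne_nil hl
      unfold PySem.Set.add
      split <;> simp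
    constructor
    · rw [List.foldl_cons, (ih _ hadd.2).1, hadd.1]
    · rw [List.foldl_cons]; exact (ih _ hadd.2).2

lemma pv_ofList_cons_headD {α : Type} [BEq α] (d x : α) (xs : List α) :
    (PySem.Set.ofList (x :: xs)).headD d = x ∧ PySem.Set.ofList (x :: xs) ≠ [] := by
  rw [PySem.Set.ofList_eq_foldl]
  have hadd : PySem.Set.add ([] : PySem.Set α) x = [x] := by
    simp [PySem.Set.add, PySem.Set.contains]
  have := pv_foldl_add_headD d xs [x] (by simp)
  simpa [List.foldl, hadd] using this

lemma pv_ofList_eq_nil {α : Type} [BEq α] [LawfulBEq α] (l : List α) :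
    PySem.Set.ofList l = [] ↔ l = [] := by
  cases l with
  | nil => simp [PySem.Set.ofList_eq_foldl]
  | cons x t => simp [(pv_ofList_cons_headD x x t).2]

lemma pv_setLen1 {α : Type} [BEq α] [LawfulBEq α] (l : List α) (d : α) :
    (PySem.Set.ofList l).length = 1 ↔ l ≠ [] ∧ ∀ x ∈ l, x = l.headD d := by
  constructor
  · intro h
    have hne : l ≠ [] := by
      intro hl; rw [hl] at h; simp [PySem.Set.ofList_eq_foldl] at h
    obtain ⟨x, t, rfl⟩ := List.exists_cons_of_ne_nil hne
    obtain ⟨a, ha⟩ := List.length_eq_one_iff.mp h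
    have hx : x ∈ PySem.Set.ofList (x :: t) := (PySem.Set.mem_ofList _ _).mpr (by simp)
    have hax : x = a := by rw [ha] at hx; simpa using hx
    refine ⟨hne, ?_⟩
    intro y hy
    have : y ∈ PySem.Set.ofList (x :: t) := (PySem.Set.mem_ofList _ _).mpr hy
    rw [ha, ← hax] at this
    simpa using this
  · rintro ⟨hne, hall⟩
    obtain ⟨x, t, rfl⟩ := List.exists_cons_of_ne_nil hne
    simp only [List.headD_cons] at hall
    have hnd := PySem.Set.nodup_ofList (x :: t)
    have hmem : ∀ y ∈ PySem.Set.ofList (x :: t), y = x := by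
      intro y hy
      exact hall y ((PySem.Set.mem_ofList _ _).mp hy)
    have hx : x ∈ PySem.Set.ofList (x :: t) := (PySem.Set.mem_ofList _ _).mpr (by simp)
    cases hD : PySem.Set.ofList (x :: t) with
    | nil => rw [hD] at hx; simp at hx
    | cons b r =>
      rw [hD] at hmem hnd
      have hb : b = x := hmem b (by simp)
      have hr : r = [] := by
        cases hr : r with
        | nil => rfl
        | cons z zs =>
          rw [hr] at hmem hnd
          have hz : z = x := hmem z (by simp)
          rw [List.nodup_cons] at hnd
          exact absurd (by simp [hb, hz]) hnd.1
      simp [hr]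

lemma pv_values_counter (cs : List Char) :
    (PySem.Dict.counter cs).values = (PySem.Set.ofList cs).map (fun k => (cs.count k : Int)) := by
  have h := PySem.Dict.items_counter cs
  simp [PySem.Dict.values, h, List.map_map, Function.comp]

lemma pv_runLengths_spec :
    ∀ (s : List Char), s.Pairwise (· ≤ ·) →
      (∀ r ∈ runLengths s, ∃ c ∈ s, r = (s.count c : Int)) ∧
      (∀ c ∈ s, (s.count c : Int) ∈ runLengths s) ∧
      (∀ x xs, s = x :: xs → (runLengths s).headD 0 = (s.count x : Int)) := by
  intro s
  induction s using runLengths.induct with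
  | case1 => intro _; refine ⟨by simp [runLengths], by simp, ?_⟩; intro x xs h; cases h
  | case2 c cs ih =>
    intro hpw
    have htail : cs.Pairwise (· ≤ ·) := hpw.of_cons
    have hsplit : cs.takeWhile (fun x => x == c) ++ cs.dropWhile (fun x => x == c) = cs :=
      List.takeWhile_append_dropWhile
    have f1 : ∀ x ∈ cs.takeWhile (fun x => x == c), x = c := by
      intro x hx
      have := List.mem_takeWhile_imp hx
      simpa using this
    have f2 : (cs.dropWhile (fun x => x == c)).Pairwise (· ≤ ·) :=
      List.Pairwise.sublist (List.dropWhile_sublist _) htail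
    have f3 : c ∉ cs.dropWhile (fun x => x == c) := by
      intro hc
      cases hd0 : cs.dropWhile (fun x => x == c) with
      | nil => rw [hd0] at hc; simp at hc
      | cons h0 r =>
        have hne0 : cs.dropWhile (fun x => x == c) ≠ [] := by rw [hd0]; simp
        have hph0 : (h0 == c) = false := by
          have := List.head_dropWhile_not (fun x => x == c) hne0
          simpa [hd0] using this
        have hne' : h0 ≠ c := by simpa using hph0
        have h0cs : h0 ∈ cs :=
          (List.dropWhile_sublist (fun x => x == c)).subset (by rw [hd0]; simp)
        have hle1 : c ≤ h0 := List.rel_of_pairwise_cons hpw h0cs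
        rw [hd0] at hc f2
        have hle2 : h0 ≤ c := by
          rcases List.mem_cons.mp hc with hc | hc
          · exact le_of_eq hc.symm
          · exact List.rel_of_pairwise_cons f2 hc
        exact hne' (le_antisymm hle2 hle1)
    have hcount_t : List.count c (cs.takeWhile (fun x => x == c)) = (cs.takeWhile (fun x => x == c)).length :=
      List.count_eq_length.mpr (fun b hb => (f1 b hb).symm)
    have hcount_d : List.count c (cs.dropWhile (fun x => x == c)) = 0 := List.count_eq_zero.mpr f3
    have hccs : List.count c cs = (cs.takeWhile (fun x => x == c)).length := by
      conv_lhs => rw [← hsplit]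
      rw [List.count_append, hcount_t, hcount_d]
      omega
    have f4 : List.count c (c :: cs) = 1 + (cs.takeWhile (fun x => x == c)).length := by
      rw [List.count_cons_self, hccs]
      omega
    have f5 : ∀ x ∈ cs.dropWhile (fun x => x == c),
        List.count x (c :: cs) = List.count x (cs.dropWhile (fun x => x == c)) := by
      intro x hx
      have hxc : x ≠ c := fun h => f3 (h ▸ hx)
      have hxt : x ∉ cs.takeWhile (fun x => x == c) := fun h => hxc (f1 x h)
      have hcx : List.count x cs = List.count x (cs.dropWhile (fun x => x == c)) := by
        conv_lhs => rw [← hsplit]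
        rw [List.count_append, List.count_eq_zero.mpr hxt]
        omega
      simp [Ne.symm hxc, hcx]
    have f6 : ∀ x, x ∈ (c :: cs) ↔ x = c ∨ x ∈ cs.dropWhile (fun x => x == c) := by
      intro x
      constructor
      · intro hx
        rcases List.mem_cons.mp hx with h | h
        · exact Or.inl h
        · rw [← hsplit] at h
          rcases List.mem_append.mp h with h | h
          · exact Or.inl (f1 x h)
          · exact Or.inr h
      · rintro (rfl | h)
        · simp
        · exact List.mem_cons_of_mem _ ((List.dropWhile_sublist _).subset h)
    have rL : runLengths (c :: cs) =
        ((1 : Int) + ((cs.takeWhile (fun x => x == c)).length : Int)) ::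
          runLengths (cs.dropWhile (fun x => x == c)) := by
      rw [runLengths]
    obtain ⟨ih1, ih2, _⟩ := ih f2
    refine ⟨?_, ?_, ?_⟩
    · intro r hr
      rw [rL] at hr
      rcases List.mem_cons.mp hr with h | h
      · exact ⟨c, by simp, by rw [h, f4]; push_cast; ring⟩
      · obtain ⟨x, hx, hrx⟩ := ih1 r h
        exact ⟨x, (f6 x).mpr (Or.inr hx), by rw [hrx, f5 x hx]⟩
    · intro x hx
      rcases (f6 x).mp hx with rfl | h
      · rw [rL, f4]
        push_cast
        exact List.mem_cons_self
      · rw [rL, f5 x h]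
        exact List.mem_cons_of_mem _ (ih2 x h)
    · intro x xs h
      injection h with h1 _
      rw [rL, ← h1, f4]
      push_cast
      simp

-- the per-word guard of A equals the per-word guard of B, with equal extracted n
lemma pv_word (cs : List Char) :
    (((PySem.Set.ofList ((PySem.Dict.counter cs).values)).length = 1 ∧
        ((PySem.Dict.counter cs).values).headD 0 > 1) ↔
      (runLengths (PySem.List.sorted cs (fun x => x) false) ≠ [] ∧
        (∀ r ∈ runLengths (PySem.List.sorted cs (fun x => x) false),
          r = (runLengths (PySem.List.sorted cs (fun x => x) false)).headD 0) ∧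
        (runLengths (PySem.List.sorted cs (fun x => x) false)).headD 0 > 1)) ∧
    (((PySem.Set.ofList ((PySem.Dict.counter cs).values)).length = 1 ∧
        ((PySem.Dict.counter cs).values).headD 0 > 1) →
      ((PySem.Dict.counter cs).values).headD 0 =
        (runLengths (PySem.List.sorted cs (fun x => x) false)).headD 0) := by
  set V := (PySem.Dict.counter cs).values with hV
  set s := PySem.List.sorted cs (fun x => x) false with hs
  set R := runLengths s with hR
  have hperm : s.Perm cs := PySem.List.sorted_perm cs (fun x => x) false
  have hcount : ∀ x, s.count x = cs.count x := fun x => hperm.count_eq x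
  have hmem : ∀ x, x ∈ s ↔ x ∈ cs := fun x => hperm.mem_iff
  have hpw : s.Pairwise (· ≤ ·) := PySem.List.sorted_pairwise cs (fun x => x)
  obtain ⟨spec1, spec2, spec3⟩ := pv_runLengths_spec s hpw
  have hVmap : V = (PySem.Set.ofList cs).map (fun k => (cs.count k : Int)) := pv_values_counter cs
  have hVmem : ∀ v, v ∈ V ↔ ∃ c ∈ cs, v = (cs.count c : Int) := by
    intro v
    rw [hVmap]
    simp only [List.mem_map, PySem.Set.mem_ofList]
    constructor
    · rintro ⟨c, hc, rfl⟩; exact ⟨c, hc, rfl⟩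
    · rintro ⟨c, hc, rfl⟩; exact ⟨c, hc, rfl⟩
  have hVhead : ∀ x xs, cs = x :: xs → V.headD 0 = (cs.count x : Int) := by
    intro x xs hx
    obtain ⟨hh, hne⟩ := pv_ofList_cons_headD x x xs
    cases hD : PySem.Set.ofList (x :: xs) with
    | nil => exact absurd hD hne
    | cons b r =>
      rw [hD] at hh; simp at hh
      rw [hVmap, hx, hD, hh]
      simp
  -- the canonical condition: nonempty ∧ all counts equal n ∧ n > 1
  have main :
      ∀ n : Int, (cs ≠ [] ∧ (∀ c ∈ cs, (cs.count c : Int) = n) ∧ n > 1) →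
        (V.headD 0 = n ∧ R.headD 0 = n) := by
    intro n ⟨hne, hall, _⟩
    obtain ⟨x, xs, hx⟩ := List.exists_cons_of_ne_nil hne
    have hsne : s ≠ [] := by
      intro h0
      rw [h0] at hperm
      exact hne hperm.nil_eq.symm
    obtain ⟨y, ys, hy⟩ := List.exists_cons_of_ne_nil hsne
    refine ⟨by rw [hVhead x xs hx]; exact hall x (by rw [hx]; simp), ?_⟩
    rw [hR, spec3 y ys hy, hcount]
    exact hall y ((hmem y).mp (by rw [hy]; simp))
  constructor
  · constructor
    · rintro ⟨hlen, hgt⟩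
      obtain ⟨hne, hallV⟩ := (pv_setLen1 V 0).mp hlen
      have hcsne : cs ≠ [] := by
        intro h0
        apply hne
        rw [hVmap, h0]
        simp [PySem.Set.ofList_eq_foldl]
      have hall : ∀ c ∈ cs, (cs.count c : Int) = V.headD 0 := by
        intro c hc
        exact hallV _ ((hVmem _).mpr ⟨c, hc, rfl⟩)
      have hcore : cs ≠ [] ∧ (∀ c ∈ cs, (cs.count c : Int) = V.headD 0) ∧ V.headD 0 > 1 :=
        ⟨hcsne, hall, hgt⟩
      obtain ⟨_, hRh⟩ := main _ hcore
      have hsne : s ≠ [] := by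
        intro h0; rw [h0] at hperm; exact hcsne hperm.nil_eq.symm
      obtain ⟨y, ys, hy⟩ := List.exists_cons_of_ne_nil hsne
      refine ⟨by rw [hR, hy, runLengths]; simp, ?_, by rw [hRh]; exact hgt⟩
      intro r hr
      obtain ⟨c, hc, rfl⟩ := spec1 r hr
      rw [hcount, hRh]
      exact hall c ((hmem c).mp hc)
    · rintro ⟨hRne, hallR, hgt⟩
      have hsne : s ≠ [] := by
        intro h0; apply hRne; rw [hR, h0, runLengths]
      have hcsne : cs ≠ [] := by
        intro h0; rw [h0] at hperm; exact hsne (List.perm_nil.mp hperm)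
      obtain ⟨x, xs, hx⟩ := List.exists_cons_of_ne_nil hcsne
      have hall : ∀ c ∈ cs, (cs.count c : Int) = R.headD 0 := by
        intro c hc
        have : (s.count c : Int) ∈ R := spec2 c ((hmem c).mpr hc)
        rw [hcount] at this
        exact hallR _ this
      obtain ⟨hVh, _⟩ := main _ ⟨hcsne, hall, hgt⟩
      constructor
      · apply (pv_setLen1 V 0).mpr
        refine ⟨by rw [hVmap]; simp [pv_ofList_eq_nil, hcsne], ?_⟩
        intro v hv
        obtain ⟨c, hc, rfl⟩ := (hVmem v).mp hv
        rw [hall c hc, hVh]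
      · rw [hVh]; exact hgt
  · rintro ⟨hlen, hgt⟩
    obtain ⟨hne, hallV⟩ := (pv_setLen1 V 0).mp hlen
    have hcsne : cs ≠ [] := by
      intro h0; apply hne; rw [hVmap, h0]; simp [PySem.Set.ofList_eq_foldl]
    have hall : ∀ c ∈ cs, (cs.count c : Int) = V.headD 0 := by
      intro c hc
      exact hallV _ ((hVmem _).mpr ⟨c, hc, rfl⟩)
    obtain ⟨hVh, hRh⟩ := main _ ⟨hcsne, hall, hgt⟩
    rw [hVh, hRh]

-- ===== VERDICT (by name: the statement is the Claim_ definition above) =====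
set_option maxHeartbeats 1000000 in
theorem find_n_isograms_spec : Claim_equal_find_n_isograms := by
  intro wordlist _
  have hfold : wordlist.foldl (fun acc word =>
      let word_lower := PySem.Str.lower word
      let frequencies := (PySem.Dict.counter word_lower.toList).values
      if (PySem.Set.ofList frequencies).length = 1 ∧ frequencies.headD 0 > 1 then
        acc ++ [(-(frequencies.headD 0), -(PySem.Str.len word), word)]
      else acc) [] =
    wordlist.foldl (fun acc word =>
      let runs := runLengths (PySem.List.sorted (PySem.Str.lower word).toList (fun x => x) false)
      if runs ≠ [] ∧ (∀ r ∈ runs, r = runs.headD 0) ∧ runs.headD 0 > 1 then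
        acc ++ [(-(runs.headD 0), -(PySem.Str.len word), word)]
      else acc) [] := by
    apply PySem.List.foldl_congr_mem
    intro acc word _
    simp only
    obtain ⟨hiff, hhead⟩ := pv_word (PySem.Str.lower word).toList
    by_cases h : (PySem.Set.ofList ((PySem.Dict.counter (PySem.Str.lower word).toList).values)).length = 1 ∧
        ((PySem.Dict.counter (PySem.Str.lower word).toList).values).headD 0 > 1
    · rw [if_pos h, if_pos (hiff.mp h), hhead h]
    · rw [if_neg h, if_neg (fun hb => h (hiff.mpr hb))]
  unfold Spec_find_n_isograms find_n_isograms find_n_isograms_alt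
  rw [hfold]
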